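-- pv_equiv track=rewrite | github.com/CoderNight/tampa-2019-12 | 004/observed_pin.py | yield_pins
-- ===== SOURCE A (Python) =====
-- alternates = {
--         '0': '08',
--         '1': '124',
--         '2': '2135',
--         '3': '326',
--         '4': '4157',
--         '5': '52468',
--         '6': '6359',
--         '7': '748',
--         '8': '85790',
--         '9': '968',
-- }
--
-- def yield_pins(observed, prefix=""):
--     if not observed:
--         yield prefix
--         return
--     key, remaining = observed[:1], observed[1:]
--     for digit in alternates.get(key, key):
--         # yield from yield_pins(remaining, prefix + digit)
--         for pin in yield_pins(remaining, prefix + digit):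
--             yield pin
-- ===== SOURCE B (Python) =====
-- alternates = {
--         '0': '08',
--         '1': '124',
--         '2': '2135',
--         '3': '326',
--         '4': '4157',
--         '5': '52468',
--         '6': '6359',
--         '7': '748',
--         '8': '85790',
--         '9': '968',
-- }
--
-- def yield_pins(observed, prefix=""):
--     # Iterative breadth-wise product: maintain the list of all partial pins,
--     # extending each by the alternates of the next observed digit.
--     pins = [prefix]
--     for c in observed:
--         choice = alternates.get(c, c)
--         pins = [p + d for p in pins for d in choice]
--     yield from pins
-- ===== Notes on version B (the rewrite author's own statement) =====
-- stated objective: idiomatic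
-- what changed: Replaces the per-position recursive generator with a single iterative left-to-right product: a running list of all partial pins is extended position by position, preserving the exact yield order.
import Mathlib
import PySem

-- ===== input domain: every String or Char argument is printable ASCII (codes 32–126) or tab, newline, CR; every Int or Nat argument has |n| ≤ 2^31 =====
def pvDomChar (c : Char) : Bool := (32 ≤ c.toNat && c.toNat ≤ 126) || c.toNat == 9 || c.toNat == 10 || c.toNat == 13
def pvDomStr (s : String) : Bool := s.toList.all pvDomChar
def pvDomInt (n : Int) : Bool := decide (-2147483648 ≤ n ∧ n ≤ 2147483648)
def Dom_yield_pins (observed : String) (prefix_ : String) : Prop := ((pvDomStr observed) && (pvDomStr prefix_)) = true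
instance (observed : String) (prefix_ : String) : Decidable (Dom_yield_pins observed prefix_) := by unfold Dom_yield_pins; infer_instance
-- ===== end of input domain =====

-- B replaces A's recursive generator by an iterative left-to-right product over the
-- observed digits (same output, same order); objective: more idiomatic/iterative.

-- the module-level `alternates` dict (shared data, used by both programs)
def pvAlternates : PySem.Dict String String := PySem.Dict.ofList
  [("0","08"),("1","124"),("2","2135"),("3","326"),("4","4157"),
   ("5","52468"),("6","6359"),("7","748"),("8","85790"),("9","968")]

-- ===== PORT A =====
-- the recursion of A, on the character list of `observed` (observed[:1]/observed[1:])
def pvYieldA : List Char → String → List String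
  | [], prefix_ => [prefix_]
  | k :: rest, prefix_ =>
    (PySem.Dict.getD pvAlternates (String.ofList [k]) (String.ofList [k])).toList.flatMap
      (fun digit => pvYieldA rest (prefix_ ++ String.ofList [digit]))

def yield_pins (observed : String) (prefix_ : String) : List String :=
  pvYieldA observed.toList prefix_

-- ===== PORT B =====
def yield_pins_alt (observed : String) (prefix_ : String) : List String :=
  observed.toList.foldl
    (fun pins c =>
      pins.flatMap (fun p =>
        (PySem.Dict.getD pvAlternates (String.ofList [c]) (String.ofList [c])).toList.map
          (fun d => p ++ String.ofList [d])))
    [prefix_]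

-- ===== PRECONDITION & SPEC =====
def Spec_yield_pins (observed : String) (prefix_ : String) (out : List String) : Prop := out = yield_pins_alt observed prefix_
instance (observed : String) (prefix_ : String) (out : List String) : Decidable (Spec_yield_pins observed prefix_ out) := by unfold Spec_yield_pins; infer_instance

-- ===== CLAIM (what is proved, stated in full; the proofs are below) =====
def Claim_equal_yield_pins : Prop := ∀ (observed : String) (prefix_ : String), Dom_yield_pins observed prefix_ → Spec_yield_pins observed prefix_ (yield_pins observed prefix_)

-- ===== LEMMAS AND PROOFS =====

-- B's fold, started from any accumulator, is the flatMap of A's recursion over it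
theorem pvFold_eq_flatMap (cs : List Char) (acc : List String) :
    acc.flatMap (fun p => pvYieldA cs p) =
    cs.foldl
      (fun pins c =>
        pins.flatMap (fun p =>
          (PySem.Dict.getD pvAlternates (String.ofList [c]) (String.ofList [c])).toList.map
            (fun d => p ++ String.ofList [d])))
      acc := by
  induction cs generalizing acc with
  | nil => simp [pvYieldA]
  | cons c cs ih =>
    rw [List.foldl_cons, ← ih]
    simp only [List.flatMap_assoc, List.flatMap_map, pvYieldA]

-- ===== VERDICT (by name: the statement is the Claim_ definition above) =====
theorem yield_pins_spec : Claim_equal_yield_pins := by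
  intro observed prefix_ _
  unfold Spec_yield_pins yield_pins yield_pins_alt
  rw [← pvFold_eq_flatMap]
  simp
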